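-- pv_equiv track=rewrite | github.com/RandyViG/SelectedTopics | Practices/OpinionMining/Practice23/Practice23.py | opinion_clasification
-- ===== SOURCE A (Python) =====
-- def opinion_clasification( opinions_, words ):
--     sentences = [ [ ] , [ ] , [ ] , [ ] , [ ]  , [ ] , [ ] ]
--     sentences_text = [ ]
--     for opinion in opinions_:
--         for j,word in enumerate(words):
--             if word in opinion:
--                 if j == 0:
--                     sentences[0].append( opinion )
--                 elif j == 1:
--                     sentences[1].append( opinion )
--                 elif j == 2:
--                     sentences[2].append( opinion )
--                 elif j == 3:
--                     sentences[3].append( opinion )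
--                 elif j == 4:
--                     sentences[4].append( opinion )
--                 elif j == 5:
--                     sentences[5].append( opinion )
--                 else:
--                     sentences[6].append( opinion )
--
--     for sentence in sentences:
--         aux = ''
--         for sent in sentence:
--             s = ''.join( sent )
--             aux += s + '\n'
--         sentences_text.append( aux )
--
--     return sentences_text
-- ===== SOURCE B (Python) =====
-- def opinion_clasification(opinions_, words):
--     def bucket(i):
--         if i < 6:
--             return [op for op in opinions_ if i < len(words) and words[i] in op]
--         return [op for op in opinions_ for w in words[6:] if w in op]
--     return [''.join(''.join(op) + '\n' for op in bucket(i)) for i in range(7)]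
-- ===== Notes on version B (the rewrite author's own statement) =====
-- stated objective: alternative
-- what changed: Inverted the traversal: instead of one classify pass over opinions that dispatches via enumerate and a six-way elif chain into seven mutable bucket lists followed by a separate formatting loop, B computes each of the seven buckets independently by a declarative comprehension (direct indexing words[i] for buckets 0-5, a scan of words[6:] for bucket 6) and joins each bucket's formatted lines in one expression.
import Mathlib
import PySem

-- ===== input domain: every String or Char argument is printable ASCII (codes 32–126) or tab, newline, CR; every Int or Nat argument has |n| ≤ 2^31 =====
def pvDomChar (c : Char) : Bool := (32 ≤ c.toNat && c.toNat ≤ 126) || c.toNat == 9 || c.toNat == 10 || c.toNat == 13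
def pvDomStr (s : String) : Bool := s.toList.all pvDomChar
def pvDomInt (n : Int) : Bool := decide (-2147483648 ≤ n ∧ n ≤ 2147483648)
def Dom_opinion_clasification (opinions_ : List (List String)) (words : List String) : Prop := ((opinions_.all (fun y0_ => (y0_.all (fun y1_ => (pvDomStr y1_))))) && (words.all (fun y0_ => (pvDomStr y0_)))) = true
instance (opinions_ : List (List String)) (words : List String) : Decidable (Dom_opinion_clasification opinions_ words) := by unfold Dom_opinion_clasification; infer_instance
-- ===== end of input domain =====

-- B inverts the traversal: seven independent per-bucket comprehension scans (direct indexing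
-- words[i] for buckets 0-5, a scan of words[6:] for bucket 6) instead of A's classify pass over
-- opinions dispatching through enumerate + a six-way elif chain into mutable buckets, followed
-- by a separate formatting loop (objective: alternative decomposition).

-- ===== PORT A =====
-- second phase's inner loop: aux = ''; for sent in sentence: aux += ''.join(sent) + '\n'
def pvFmtA (sentence : List (List String)) : String :=
  sentence.foldl (fun aux sent => aux ++ (PySem.Str.join "" sent ++ "\n")) ""

def opinion_clasification (opinions_ : List (List String)) (words : List String) : List String :=
  let sentences0 : List (List (List String)) := [[], [], [], [], [], [], []]
  let sentences :=
    opinions_.foldl (fun sentences opinion =>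
      (PySem.List.enumerate words 0).foldl (fun sentences jw =>
        if opinion.contains jw.2 then
          if jw.1 = 0 then
            PySem.List.pySetD sentences 0 (PySem.List.pyGetD sentences 0 [] ++ [opinion])
          else if jw.1 = 1 then
            PySem.List.pySetD sentences 1 (PySem.List.pyGetD sentences 1 [] ++ [opinion])
          else if jw.1 = 2 then
            PySem.List.pySetD sentences 2 (PySem.List.pyGetD sentences 2 [] ++ [opinion])
          else if jw.1 = 3 then
            PySem.List.pySetD sentences 3 (PySem.List.pyGetD sentences 3 [] ++ [opinion])
          else if jw.1 = 4 then
            PySem.List.pySetD sentences 4 (PySem.List.pyGetD sentences 4 [] ++ [opinion])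
          else if jw.1 = 5 then
            PySem.List.pySetD sentences 5 (PySem.List.pyGetD sentences 5 [] ++ [opinion])
          else
            PySem.List.pySetD sentences 6 (PySem.List.pyGetD sentences 6 [] ++ [opinion])
        else sentences) sentences) sentences0
  sentences.foldl (fun sentences_text sentence => sentences_text ++ [pvFmtA sentence]) []

-- ===== PORT B =====
-- bucket(i): i < 6 → [op for op in opinions_ if i < len(words) and words[i] in op]
--            i = 6 → [op for op in opinions_ for w in words[6:] if w in op]
def pvBucket (opinions_ : List (List String)) (words : List String) (i : Int) : List (List String) :=
  if i < 6 then
    opinions_.filter (fun op =>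
      decide (i < (words.length : Int)) && op.contains (PySem.List.pyGetD words i ""))
  else
    opinions_.flatMap (fun op =>
      ((PySem.List.slice words (some 6) none).filter (fun w => op.contains w)).map (fun _ => op))

def opinion_clasification_alt (opinions_ : List (List String)) (words : List String) : List String :=
  (PySem.List.pyRange 0 7 1).map (fun i =>
    PySem.Str.join "" ((pvBucket opinions_ words i).map (fun op => PySem.Str.join "" op ++ "\n")))

-- ===== PRECONDITION & SPEC =====
def Spec_opinion_clasification (opinions_ : List (List String)) (words : List String) (out : List String) : Prop := out = opinion_clasification_alt opinions_ words
instance (opinions_ : List (List String)) (words : List String) (out : List String) : Decidable (Spec_opinion_clasification opinions_ words out) := by unfold Spec_opinion_clasification; infer_instance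

-- ===== CLAIM (what is proved, stated in full; the proofs are below) =====
def Claim_equal_opinion_clasification : Prop := ∀ (opinions_ : List (List String)) (words : List String), Dom_opinion_clasification opinions_ words → Spec_opinion_clasification opinions_ words (opinion_clasification opinions_ words)

-- ===== LEMMAS AND PROOFS =====

-- the formatted line of one opinion
def pvLine (op : List String) : String := PySem.Str.join "" op ++ "\n"

-- ''.join at the List Char level peels off the head piece
theorem pvCharsJoin_nil_cons (p : List Char) (rest : List (List Char)) :
    PySem.Chars.join [] (p :: rest) = p ++ PySem.Chars.join [] rest := by
  cases rest with
  | nil => simp [PySem.Chars.join_singleton, PySem.Chars.join_nil]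
  | cons q rest => simp [PySem.Chars.join_cons_cons]

-- ''.join at the String level peels off the head piece
theorem pvStrJoin_nil_cons (s : String) (rest : List String) :
    PySem.Str.join "" (s :: rest) = s ++ PySem.Str.join "" rest := by
  rw [← String.toList_inj]
  simp [PySem.Str.toList_join, pvCharsJoin_nil_cons]

-- a string-accumulating foldl factors through its start value
theorem pvFoldl_append_factor (g : List String → String) (l : List (List String)) (a : String) :
    l.foldl (fun aux s => aux ++ g s) a = a ++ l.foldl (fun aux s => aux ++ g s) "" := by
  induction l generalizing a with
  | nil => simp
  | cons x l ih =>
    simp only [List.foldl_cons]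
    rw [ih ("" ++ g x), ih (a ++ g x)]
    simp [String.append_assoc]

-- A's bucket formatting equals joining the preformatted lines
theorem pvFmtA_eq_join_lines (b : List (List String)) :
    pvFmtA b = PySem.Str.join "" (b.map pvLine) := by
  induction b with
  | nil =>
    rw [← String.toList_inj]
    simp [pvFmtA, PySem.Str.toList_join, PySem.Chars.join_nil]
  | cons x b ih =>
    unfold pvFmtA
    simp only [List.foldl_cons, List.map_cons]
    rw [pvFoldl_append_factor, pvStrJoin_nil_cons, ← ih]
    simp [pvFmtA, pvLine]

-- A's six-way if/elif chain is an update at index min j 6 (for j ≥ 0)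
theorem pvChainA_eq_set (S : List (List (List String))) (op : List String) (j : Int) (hj : 0 ≤ j) :
    (if j = 0 then
        PySem.List.pySetD S 0 (PySem.List.pyGetD S 0 [] ++ [op])
      else if j = 1 then
        PySem.List.pySetD S 1 (PySem.List.pyGetD S 1 [] ++ [op])
      else if j = 2 then
        PySem.List.pySetD S 2 (PySem.List.pyGetD S 2 [] ++ [op])
      else if j = 3 then
        PySem.List.pySetD S 3 (PySem.List.pyGetD S 3 [] ++ [op])
      else if j = 4 then
        PySem.List.pySetD S 4 (PySem.List.pyGetD S 4 [] ++ [op])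
      else if j = 5 then
        PySem.List.pySetD S 5 (PySem.List.pyGetD S 5 [] ++ [op])
      else
        PySem.List.pySetD S 6 (PySem.List.pyGetD S 6 [] ++ [op])) =
    PySem.List.pySetD S (min j 6) (PySem.List.pyGetD S (min j 6) [] ++ [op]) := by
  split_ifs with h0 h1 h2 h3 h4 h5 <;>
    first
    | (subst_vars; rfl)
    | (have : min j 6 = 6 := by omega
       rw [this])

-- getD after a pySetD at a nonnegative in-range index
theorem pvSetD_getD (S : List (List (List String))) (m : Int) (hm : 0 ≤ m)
    (hlt : m < (S.length : Int)) (v : List (List String)) (i : Nat) :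
    (PySem.List.pySetD S m v).getD i [] = if (i : Int) = m then v else S.getD i [] := by
  rw [PySem.List.pySetD_of_nonneg _ _ hm]
  by_cases h : (i : Int) = m
  · rw [if_pos h]
    have hi : m.toNat = i := by omega
    have hr : m.toNat < S.length := by omega
    simp [List.getD_eq_getElem?_getD, List.getElem?_set, hi, hi ▸ hr]
  · rw [if_neg h]
    have hne : ¬ (m.toNat = i) := by omega
    simp [List.getD_eq_getElem?_getD, List.getElem?_set, hne]

-- the inner fold preserves the length of the bucket list
theorem pvInner_length (op : List String) (l : List (Int × String))
    (hl : ∀ p ∈ l, 0 ≤ p.1) (S : List (List (List String))) :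
    (l.foldl (fun sentences jw =>
        if op.contains jw.2 then
          if jw.1 = 0 then
            PySem.List.pySetD sentences 0 (PySem.List.pyGetD sentences 0 [] ++ [op])
          else if jw.1 = 1 then
            PySem.List.pySetD sentences 1 (PySem.List.pyGetD sentences 1 [] ++ [op])
          else if jw.1 = 2 then
            PySem.List.pySetD sentences 2 (PySem.List.pyGetD sentences 2 [] ++ [op])
          else if jw.1 = 3 then
            PySem.List.pySetD sentences 3 (PySem.List.pyGetD sentences 3 [] ++ [op])
          else if jw.1 = 4 then
            PySem.List.pySetD sentences 4 (PySem.List.pyGetD sentences 4 [] ++ [op])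
          else if jw.1 = 5 then
            PySem.List.pySetD sentences 5 (PySem.List.pyGetD sentences 5 [] ++ [op])
          else
            PySem.List.pySetD sentences 6 (PySem.List.pyGetD sentences 6 [] ++ [op])
        else sentences) S).length = S.length := by
  induction l generalizing S with
  | nil => rfl
  | cons p l ih =>
    have hp : 0 ≤ p.1 := hl p (List.mem_cons_self ..)
    have hl' : ∀ q ∈ l, 0 ≤ q.1 := fun q hq => hl q (List.mem_cons_of_mem _ hq)
    simp only [List.foldl_cons]
    rw [pvChainA_eq_set S op p.1 hp]
    by_cases hc : op.contains p.2
    · simp only [hc, if_true]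
      rw [ih hl']
      exact PySem.List.length_pySetD ..
    · simp only [hc, if_false]
      exact ih hl' S

-- bucket i of the inner fold: the start bucket extended by op once per matching word of index-class i
theorem pvInner_getD (op : List String) (l : List (Int × String))
    (hl : ∀ p ∈ l, 0 ≤ p.1) (S : List (List (List String))) (hS : S.length = 7)
    (i : Nat) (hi : i < 7) :
    (l.foldl (fun sentences jw =>
        if op.contains jw.2 then
          if jw.1 = 0 then
            PySem.List.pySetD sentences 0 (PySem.List.pyGetD sentences 0 [] ++ [op])
          else if jw.1 = 1 then
            PySem.List.pySetD sentences 1 (PySem.List.pyGetD sentences 1 [] ++ [op])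
          else if jw.1 = 2 then
            PySem.List.pySetD sentences 2 (PySem.List.pyGetD sentences 2 [] ++ [op])
          else if jw.1 = 3 then
            PySem.List.pySetD sentences 3 (PySem.List.pyGetD sentences 3 [] ++ [op])
          else if jw.1 = 4 then
            PySem.List.pySetD sentences 4 (PySem.List.pyGetD sentences 4 [] ++ [op])
          else if jw.1 = 5 then
            PySem.List.pySetD sentences 5 (PySem.List.pyGetD sentences 5 [] ++ [op])
          else
            PySem.List.pySetD sentences 6 (PySem.List.pyGetD sentences 6 [] ++ [op])
        else sentences) S).getD i [] =
      S.getD i [] ++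
        (l.filter (fun jw => op.contains jw.2 && decide (min jw.1 6 = (i : Int)))).map
          (fun _ => op) := by
  induction l generalizing S with
  | nil => simp
  | cons p l ih =>
    have hp : 0 ≤ p.1 := hl p (List.mem_cons_self ..)
    have hl' : ∀ q ∈ l, 0 ≤ q.1 := fun q hq => hl q (List.mem_cons_of_mem _ hq)
    simp only [List.foldl_cons, List.filter_cons]
    rw [pvChainA_eq_set S op p.1 hp]
    by_cases hc : op.contains p.2
    · simp only [hc, if_true, Bool.true_and]
      have hm0 : 0 ≤ min p.1 6 := by omega
      have hmlt : min p.1 6 < (S.length : Int) := by omega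
      have hS' : (PySem.List.pySetD S (min p.1 6)
          (PySem.List.pyGetD S (min p.1 6) [] ++ [op])).length = 7 := by
        rw [PySem.List.length_pySetD]; exact hS
      rw [ih hl' _ hS']
      rw [pvSetD_getD S (min p.1 6) hm0 hmlt _ i]
      by_cases heq : min p.1 6 = (i : Int)
      · rw [if_pos heq.symm, heq, PySem.List.pyGetD_natCast]
        simp [heq, List.append_assoc]
      · have hne : ¬ ((i : Int) = min p.1 6) := fun h => heq h.symm
        simp [heq, hne]
    · have hb : op.contains p.2 = false := by simpa using hc
      rw [if_neg hc, hb]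
      simp only [Bool.false_and, Bool.false_eq_true, if_false]
      exact ih hl' S hS

-- bucket i of the outer fold over all opinions
theorem pvOuter_getD (ops : List (List String)) (words : List String)
    (S : List (List (List String))) (hS : S.length = 7) (i : Nat) (hi : i < 7) :
    (ops.foldl (fun sentences opinion =>
        (PySem.List.enumerate words 0).foldl (fun sentences jw =>
          if opinion.contains jw.2 then
            if jw.1 = 0 then
              PySem.List.pySetD sentences 0 (PySem.List.pyGetD sentences 0 [] ++ [opinion])
            else if jw.1 = 1 then
              PySem.List.pySetD sentences 1 (PySem.List.pyGetD sentences 1 [] ++ [opinion])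
            else if jw.1 = 2 then
              PySem.List.pySetD sentences 2 (PySem.List.pyGetD sentences 2 [] ++ [opinion])
            else if jw.1 = 3 then
              PySem.List.pySetD sentences 3 (PySem.List.pyGetD sentences 3 [] ++ [opinion])
            else if jw.1 = 4 then
              PySem.List.pySetD sentences 4 (PySem.List.pyGetD sentences 4 [] ++ [opinion])
            else if jw.1 = 5 then
              PySem.List.pySetD sentences 5 (PySem.List.pyGetD sentences 5 [] ++ [opinion])
            else
              PySem.List.pySetD sentences 6 (PySem.List.pyGetD sentences 6 [] ++ [opinion])
          else sentences) sentences) S).getD i [] =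
      S.getD i [] ++
        ops.flatMap (fun op =>
          ((PySem.List.enumerate words 0).filter
              (fun jw => op.contains jw.2 && decide (min jw.1 6 = (i : Int)))).map
            (fun _ => op)) := by
  induction ops generalizing S with
  | nil => simp
  | cons op ops ih =>
    simp only [List.foldl_cons, List.flatMap_cons]
    have henum : ∀ p ∈ PySem.List.enumerate words 0, (0:Int) ≤ p.1 := by
      intro p hp
      rcases (PySem.List.mem_enumerate_iff words 0 p).1 hp with ⟨k, hk, rfl⟩
      simp
    have hS' := pvInner_length op (PySem.List.enumerate words 0) henum S
    rw [hS] at hS'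
    rw [ih _ hS', pvInner_getD op _ henum S hS i hi, List.append_assoc]

-- and the outer fold keeps length 7
theorem pvOuter_length (ops : List (List String)) (words : List String)
    (S : List (List (List String))) :
    (ops.foldl (fun sentences opinion =>
        (PySem.List.enumerate words 0).foldl (fun sentences jw =>
          if opinion.contains jw.2 then
            if jw.1 = 0 then
              PySem.List.pySetD sentences 0 (PySem.List.pyGetD sentences 0 [] ++ [opinion])
            else if jw.1 = 1 then
              PySem.List.pySetD sentences 1 (PySem.List.pyGetD sentences 1 [] ++ [opinion])
            else if jw.1 = 2 then
              PySem.List.pySetD sentences 2 (PySem.List.pyGetD sentences 2 [] ++ [opinion])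
            else if jw.1 = 3 then
              PySem.List.pySetD sentences 3 (PySem.List.pyGetD sentences 3 [] ++ [opinion])
            else if jw.1 = 4 then
              PySem.List.pySetD sentences 4 (PySem.List.pyGetD sentences 4 [] ++ [opinion])
            else if jw.1 = 5 then
              PySem.List.pySetD sentences 5 (PySem.List.pyGetD sentences 5 [] ++ [opinion])
            else
              PySem.List.pySetD sentences 6 (PySem.List.pyGetD sentences 6 [] ++ [opinion])
          else sentences) sentences) S).length = S.length := by
  induction ops generalizing S with
  | nil => rfl
  | cons op ops ih =>
    have henum : ∀ p ∈ PySem.List.enumerate words 0, (0:Int) ≤ p.1 := by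
      intro p hp
      rcases (PySem.List.mem_enumerate_iff words 0 p).1 hp with ⟨k, hk, rfl⟩
      simp
    simp only [List.foldl_cons]
    rw [ih, pvInner_length op _ henum S]

-- low buckets: the matching enumerate entries form a singleton exactly when words[i] (i < 6) is in the opinion
theorem pvEnumFilter_low (p : String → Bool) (i : Int) (hi0 : 0 ≤ i) (hi6 : i < 6) :
    ∀ (ws : List String) (s : Int), 0 ≤ s →
      (PySem.List.enumerate ws s).filter (fun jw => p jw.2 && decide (min jw.1 6 = i)) =
        (if s ≤ i ∧ (i - s).toNat < ws.length ∧ p (ws.getD (i - s).toNat "") then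
          [(i, ws.getD (i - s).toNat "")] else []) := by
  intro ws
  induction ws with
  | nil =>
    intro s hs
    have hno : ¬ (s ≤ i ∧ (i - s).toNat < ([] : List String).length ∧
        p (([] : List String).getD (i - s).toNat "") = true) := by simp
    rw [PySem.List.enumerate_nil, List.filter_nil, if_neg hno]
  | cons w ws ih =>
    intro s hs
    rw [PySem.List.enumerate_cons, List.filter_cons]
    by_cases heq : s = i
    · subst heq
      have : min s 6 = s := by omega
      have hrec := ih (s + 1) (by omega)
      rw [hrec]
      simp only [this, decide_true, Bool.and_true]
      have h1 : ¬ (s + 1 ≤ s) := by omega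
      have h0 : (s - s).toNat = 0 := by omega
      by_cases hp : p w
      · simp [hp, h1, h0]
      · simp [hp, h1, h0]
    · have hmin : ¬ (min s 6 = i) := by omega
      have hhead : (p w && decide (min s 6 = i)) = false := by simp [hmin]
      rw [hhead]
      simp only [Bool.false_eq_true, if_false]
      rw [ih (s + 1) (by omega)]
      by_cases hlt : s < i
      · have e2 : (i - s).toNat = (i - (s + 1)).toNat + 1 := by omega
        rw [e2]
        simp only [List.getD_cons_succ, List.length_cons]
        exact if_congr (by constructor <;> (rintro ⟨a, b, c⟩; exact ⟨by omega, by omega, c⟩))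
          rfl rfl
      · have h1 : ¬ (s ≤ i) := by omega
        have h2 : ¬ (s + 1 ≤ i) := by omega
        simp [h1, h2]

-- top bucket: the matching enumerate entries with index ≥ 6 count the matching words of words[6:]
theorem pvEnumFilter_high (p : String → Bool) :
    ∀ (ws : List String) (s : Int), 0 ≤ s →
      ((PySem.List.enumerate ws s).filter
          (fun jw => p jw.2 && decide (min jw.1 6 = (6 : Int)))).length =
        ((ws.drop (6 - s).toNat).filter p).length := by
  intro ws
  induction ws with
  | nil => intro s hs; simp [PySem.List.enumerate_nil]
  | cons w ws ih =>
    intro s hs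
    rw [PySem.List.enumerate_cons, List.filter_cons]
    by_cases h6 : 6 ≤ s
    · have hmin : min s 6 = (6 : Int) := by omega
      have h0 : (6 - s).toNat = 0 := by omega
      have h0' : (6 - (s + 1)).toNat = 0 := by omega
      rw [h0, List.drop_zero, List.filter_cons]
      by_cases hp : p w
      · rw [if_pos (by simp [hp, hmin]), if_pos hp]
        simp only [List.length_cons]
        rw [ih (s + 1) (by omega), h0', List.drop_zero]
      · rw [if_neg (by simp [hp]), if_neg hp]
        rw [ih (s + 1) (by omega), h0', List.drop_zero]
    · have hmin : ¬ (min s 6 = (6 : Int)) := by omega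
      have hd : (6 - s).toNat = (6 - (s + 1)).toNat + 1 := by omega
      rw [if_neg (by simp [hmin]), ih (s + 1) (by omega), hd, List.drop_succ_cons]

-- a flatMap of 0/1-element lists is a filter
theorem pvFlatMap_if_singleton (l : List (List String)) (q : List String → Bool) :
    l.flatMap (fun x => if q x then [x] else []) = l.filter q := by
  induction l with
  | nil => rfl
  | cons x l ih =>
    by_cases h : q x <;> simp [List.flatMap_cons, h, ih, List.filter_cons]

-- each bucket of B equals the flatMap characterisation of A's bucket i
theorem pvBucket_eq_flatMap (ops : List (List String)) (words : List String)
    (i : Nat) (hi : i < 7) :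
    pvBucket ops words (i : Int) =
      ops.flatMap (fun op =>
        ((PySem.List.enumerate words 0).filter
            (fun jw => op.contains jw.2 && decide (min jw.1 6 = (i : Int)))).map
          (fun _ => op)) := by
  by_cases hi6 : i < 6
  · unfold pvBucket
    rw [if_pos (by exact_mod_cast hi6)]
    rw [← pvFlatMap_if_singleton]
    congr 1
    funext op
    rw [pvEnumFilter_low (fun w => op.contains w) (i : Int) (by omega) (by exact_mod_cast hi6)
        words 0 le_rfl]
    have hto : ((i : Int) - 0).toNat = i := by omega
    rw [hto]
    by_cases hlen : i < words.length
    · have hg : words.getD i "" = words[i] := by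
        rw [List.getD_eq_getElem?_getD, List.getElem?_eq_getElem hlen]; rfl
      rw [hg]
      by_cases hct : words[i] ∈ op
      · simp [hlen, hct]
      · simp [hlen, hct]
    · simp [hlen]
  · have hieq : i = 6 := by omega
    subst hieq
    unfold pvBucket
    rw [if_neg (by norm_num)]
    congr 1
    funext op
    simp only [Nat.cast_ofNat]
    rw [List.map_const', List.map_const']
    congr 1
    rw [pvEnumFilter_high (fun w => op.contains w) words 0 le_rfl]
    rw [PySem.List.slice_from words (by norm_num : (0:Int) ≤ 6)]
    norm_num

-- initial buckets are all empty
theorem pvS0_getD (i : Nat) :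
    ([[], [], [], [], [], [], []] : List (List (List String))).getD i [] = [] := by
  rcases i with _|_|_|_|_|_|_|i <;> simp [List.getD]

-- ===== VERDICT (by name: the statement is the Claim_ definition above) =====
theorem opinion_clasification_spec : Claim_equal_opinion_clasification := by
  intro ops words _
  unfold Spec_opinion_clasification opinion_clasification opinion_clasification_alt
  dsimp only
  rw [PySem.List.foldl_append_singleton_eq_map, List.nil_append]
  apply List.ext_getElem
  · rw [List.length_map, List.length_map, pvOuter_length, PySem.List.length_pyRange_one]
    rfl
  · intro n h1 h2
    have hn7 : n < 7 := by
      rw [List.length_map, pvOuter_length] at h1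
      simpa using h1
    simp only [List.getElem_map]
    rw [PySem.List.getElem_pyRange_one, zero_add]
    have hfold := pvOuter_getD ops words ([[], [], [], [], [], [], []]) rfl n hn7
    rw [pvS0_getD, List.nil_append] at hfold
    rw [List.length_map] at h1
    rw [← List.getD_eq_getElem _ [] h1, hfold, ← pvBucket_eq_flatMap ops words n hn7]
    simpa [pvLine] using pvFmtA_eq_join_lines (pvBucket ops words (n : Int))
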